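-- pv_equiv track=rewrite | github.com/Quantakavin/imcprosperity | manual/round_1/round_1/8.py | get_fill
-- ===== SOURCE A (Python) =====
-- bids = {
--     20: 43000,
--     19: 17000,
--     18: 6000,
--     17: 5000,
--     16: 10000,
--     15: 5000,
--     14: 10000,
--     13: 7000
-- }
--
-- asks = {
--     12: 20000,
--     13: 25000,
--     14: 35000,
--     15: 6000,
--     16: 5000,
--     17: 0,
--     18: 10000,
--     19: 12000
-- }
--
-- def get_volume(price, all_bids, all_asks):
--     buy = 0
--     sell = 0
--
--     for p in all_bids:
--         if p >= price:
--             buy += all_bids[p]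
--
--     for p in all_asks:
--         if p <= price:
--             sell += all_asks[p]
--
--     return min(buy, sell)
--
-- def get_clearing_price(all_bids, all_asks):
--     prices = sorted(set(all_bids) | set(all_asks))
--     best_price = -1
--     best_volume = -1
--
--     for price in prices:
--         volume = get_volume(price, all_bids, all_asks)
--         if volume > best_volume or (volume == best_volume and price > best_price):
--             best_volume = volume
--             best_price = price
--
--     return best_price
--
-- def get_fill(my_price, my_qty):
--     all_bids = bids.copy()
--     all_bids[my_price] = all_bids.get(my_price, 0) + my_qty
--
--     clearing_price = get_clearing_price(all_bids, asks)
--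
--     if my_price < clearing_price:
--         return clearing_price, 0
--
--     supply = 0
--     for p in asks:
--         if p <= clearing_price:
--             supply += asks[p]
--
--     before_me = 0
--
--     for p in all_bids:
--         if p > my_price and p >= clearing_price:
--             before_me += all_bids[p]
--
--     if my_price >= clearing_price:
--         before_me += bids.get(my_price, 0)
--
--     fill = min(my_qty, max(0, supply - before_me))
--     return clearing_price, fill
-- ===== SOURCE B (Python) =====
-- bids = {
--     20: 43000,
--     19: 17000,
--     18: 6000,
--     17: 5000,
--     16: 10000,
--     15: 5000,
--     14: 10000,
--     13: 7000
-- }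
--
-- asks = {
--     12: 20000,
--     13: 25000,
--     14: 35000,
--     15: 6000,
--     16: 5000,
--     17: 0,
--     18: 10000,
--     19: 12000
-- }
--
-- def get_fill(my_price, my_qty):
--     all_bids = dict(bids)
--     all_bids[my_price] = all_bids.get(my_price, 0) + my_qty
--     prices = sorted(set(all_bids) | set(asks))
--
--     # suffix sums: buys[i] = total bid quantity at price levels >= prices[i]
--     buys = []
--     b = 0
--     for p in reversed(prices):
--         b += all_bids.get(p, 0)
--         buys.append(b)
--     buys.reverse()
--
--     # one ascending sweep: the running prefix sum s of ask quantity is the sell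
--     # volume at the current level; track the supply at the chosen level as we go
--     best_price, best_volume, supply = -1, -1, 0
--     s = 0
--     for p, buy in zip(prices, buys):
--         s += asks.get(p, 0)
--         v = min(buy, s)
--         if v > best_volume or (v == best_volume and p > best_price):
--             best_price, best_volume, supply = p, v, s
--     clearing_price = best_price
--
--     if my_price < clearing_price:
--         return clearing_price, 0
--
--     before_me = sum(q for p, q in bids.items() if p > my_price and p >= clearing_price)
--     before_me += bids.get(my_price, 0)
--     return clearing_price, min(my_qty, max(0, supply - before_me))
-- ===== Notes on version B (the rewrite author's own statement) =====
-- stated objective: alternative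
-- what changed: Replaces the per-candidate-price rescans of both books (get_volume called at every price level) by one-sweep cumulative tables: suffix sums of bid quantity and a running prefix sum of ask quantity over the sorted price levels, selecting the clearing price and its supply in a single ascending pass.
import Mathlib
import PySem

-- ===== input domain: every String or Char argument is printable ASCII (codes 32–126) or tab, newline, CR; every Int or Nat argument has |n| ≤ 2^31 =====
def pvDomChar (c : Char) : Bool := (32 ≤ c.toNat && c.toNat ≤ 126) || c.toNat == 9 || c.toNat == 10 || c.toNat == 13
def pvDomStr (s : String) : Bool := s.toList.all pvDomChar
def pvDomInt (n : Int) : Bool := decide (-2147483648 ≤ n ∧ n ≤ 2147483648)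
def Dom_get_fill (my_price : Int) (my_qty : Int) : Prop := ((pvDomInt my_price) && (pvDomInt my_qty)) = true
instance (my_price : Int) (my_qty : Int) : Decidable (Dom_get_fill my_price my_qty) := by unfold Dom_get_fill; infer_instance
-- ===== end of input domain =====

-- B replaces A's per-price rescans of both books by cumulative volume sums over the
-- sorted price levels, selecting the clearing price and its supply in one ascending sweep.

-- ===== PORT A =====
def pyBids : PySem.Dict Int Int :=
  PySem.Dict.ofList [(20, 43000), (19, 17000), (18, 6000), (17, 5000), (16, 10000), (15, 5000), (14, 10000), (13, 7000)]

def pyAsks : PySem.Dict Int Int :=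
  PySem.Dict.ofList [(12, 20000), (13, 25000), (14, 35000), (15, 6000), (16, 5000), (17, 0), (18, 10000), (19, 12000)]

def get_volume (price : Int) (all_bids all_asks : PySem.Dict Int Int) : Int :=
  let buy := all_bids.items.foldl (fun acc kv => if kv.1 ≥ price then acc + kv.2 else acc) 0
  let sell := all_asks.items.foldl (fun acc kv => if kv.1 ≤ price then acc + kv.2 else acc) 0
  min buy sell

def get_clearing_price (all_bids all_asks : PySem.Dict Int Int) : Int :=
  let prices := PySem.List.sorted (PySem.Set.union (PySem.Set.ofList all_bids.keys) all_asks.keys) (fun x => x) false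
  let st := prices.foldl (fun (st : Int × Int) price =>
      let volume := get_volume price all_bids all_asks
      if volume > st.2 ∨ (volume = st.2 ∧ price > st.1) then (price, volume) else st) (-1, -1)
  st.1

def get_fill (my_price : Int) (my_qty : Int) : Int × Int :=
  let all_bids := pyBids.insert my_price (pyBids.getD my_price 0 + my_qty)
  let clearing_price := get_clearing_price all_bids pyAsks
  if my_price < clearing_price then (clearing_price, 0)
  else
    let supply := pyAsks.items.foldl (fun acc kv => if kv.1 ≤ clearing_price then acc + kv.2 else acc) 0
    let before_me := all_bids.items.foldl (fun acc kv => if kv.1 > my_price ∧ kv.1 ≥ clearing_price then acc + kv.2 else acc) 0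
    let before_me := if my_price ≥ clearing_price then before_me + pyBids.getD my_price 0 else before_me
    (clearing_price, min my_qty (max 0 (supply - before_me)))

-- ===== PORT B =====
-- buys of Source B: reverse loop accumulating suffix sums, appended then reversed back
def sufBuys (all_bids : PySem.Dict Int Int) (prices : List Int) : List Int :=
  (prices.reverse.foldl (fun (st : Int × List Int) p =>
      (st.1 + all_bids.getD p 0, st.2 ++ [st.1 + all_bids.getD p 0])) (0, [])).2.reverse

def get_fill_alt (my_price : Int) (my_qty : Int) : Int × Int :=
  let all_bids := pyBids.insert my_price (pyBids.getD my_price 0 + my_qty)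
  let prices := PySem.List.sorted (PySem.Set.union (PySem.Set.ofList all_bids.keys) pyAsks.keys) (fun x => x) false
  let buys := sufBuys all_bids prices
  let st := (prices.zip buys).foldl (fun (st : Int × Int × Int × Int) pb =>
      let s := st.2.2.2 + pyAsks.getD pb.1 0
      let v := min pb.2 s
      if v > st.2.1 ∨ (v = st.2.1 ∧ pb.1 > st.1) then (pb.1, v, s, s) else (st.1, st.2.1, st.2.2.1, s))
      (-1, -1, 0, 0)
  let clearing_price := st.1
  if my_price < clearing_price then (clearing_price, 0)
  else
    let before_me := ((pyBids.items.filter (fun kv => decide (kv.1 > my_price ∧ kv.1 ≥ clearing_price))).map (·.2)).sum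
        + pyBids.getD my_price 0
    (clearing_price, min my_qty (max 0 (st.2.2.1 - before_me)))

-- ===== PRECONDITION & SPEC =====
def Spec_get_fill (my_price : Int) (my_qty : Int) (out : Int × Int) : Prop := out = get_fill_alt my_price my_qty
instance (my_price : Int) (my_qty : Int) (out : Int × Int) : Decidable (Spec_get_fill my_price my_qty out) := by unfold Spec_get_fill; infer_instance

-- ===== CLAIM (what is proved, stated in full; the proofs are below) =====
def Claim_equal_get_fill : Prop := ∀ (my_price : Int) (my_qty : Int), Dom_get_fill my_price my_qty → Spec_get_fill my_price my_qty (get_fill my_price my_qty)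

-- ===== LEMMAS AND PROOFS =====

-- total bid volume at levels ≥ x / ask volume at levels ≤ x (A's get_volume components)
def BUYof (d : PySem.Dict Int Int) (x : Int) : Int :=
  ((d.items.filter (fun kv => decide (kv.1 ≥ x))).map (·.2)).sum
def SELLof (x : Int) : Int :=
  ((pyAsks.items.filter (fun kv => decide (kv.1 ≤ x))).map (·.2)).sum
def stepA (d : PySem.Dict Int Int) (st : Int × Int) (p : Int) : Int × Int :=
  let v := min (BUYof d p) (SELLof p)
  if v > st.2 ∨ (v = st.2 ∧ p > st.1) then (p, v) else st

lemma get_volume_eq (price : Int) (d : PySem.Dict Int Int) :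
    get_volume price d pyAsks = min (BUYof d price) (SELLof price) := by
  simp [get_volume, BUYof, SELLof, PySem.List.foldl_ite_eq_foldl_filter, PySem.List.foldl_add]

lemma sum_map_subset (l m : List Int) (f : Int → Int) (hl : l.Nodup) (hm : m.Nodup)
    (hsub : ∀ x ∈ m, x ∈ l) (hz : ∀ x ∈ l, x ∉ m → f x = 0) :
    (l.map f).sum = (m.map f).sum := by
  have hperm : List.Perm (l.filter (fun x => decide (x ∈ m))) m := by
    rw [List.perm_ext_iff_of_nodup (hl.filter _) hm]
    intro a; simp only [List.mem_filter, decide_eq_true_eq]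
    exact ⟨fun h => h.2, fun h => ⟨hsub a h, h⟩⟩
  have hsplit := List.filter_append_perm (fun x => decide (x ∈ m)) l
  have : ((l.filter (fun x => decide (x ∈ m)) ++ l.filter (fun x => !decide (x ∈ m))).map f).sum
      = (l.map f).sum := by
    exact (hsplit.map f).sum_eq
  rw [← this, List.map_append, List.sum_append, ← (hperm.map f).sum_eq]
  have hz' : ((l.filter (fun x => !decide (x ∈ m))).map f).sum = 0 := by
    apply List.sum_eq_zero
    intro y hy
    simp only [List.mem_map, List.mem_filter, Bool.not_eq_true', decide_eq_false_iff_not] at hy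
    obtain ⟨x, ⟨hxl, hxm⟩, rfl⟩ := hy
    exact hz x hxl hxm
  rw [hz']; ring

lemma sum_filter_getD (big : List Int) (d : PySem.Dict Int Int) (P : Int → Bool)
    (hbig : big.Nodup) (hnd : d.keys.Nodup) (hsub : ∀ k ∈ d.keys, k ∈ big) :
    ((big.filter P).map (fun q => d.getD q 0)).sum
      = ((d.items.filter (fun kv => P kv.1)).map (·.2)).sum := by
  have hitems := PySem.Dict.items_eq_map_keys d hnd 0
  rw [hitems, List.filter_map, List.map_map]
  have h1 : ((fun kv : Int × Int => P kv.1) ∘ fun k => (k, d.getD k 0)) = P := by funext k; rfl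
  have h2 : ((fun kv : Int × Int => kv.2) ∘ fun k => (k, d.getD k 0)) = fun q => d.getD q 0 := by
    funext k; rfl
  rw [h1, h2]
  apply sum_map_subset
  · exact hbig.filter _
  · exact hnd.filter _
  · intro x hx
    simp only [List.mem_filter] at hx ⊢
    exact ⟨hsub x hx.1, hx.2⟩
  · intro x hx hxm
    simp only [List.mem_filter] at hx hxm
    have hxk : x ∉ d.keys := fun h => hxm ⟨h, hx.2⟩
    apply PySem.Dict.getD_of_not_contains
    rw [← Bool.not_eq_true, PySem.Dict.contains_iff_mem_keys]
    exact hxk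

-- suffix sums, mathematically
def sufSums (d : PySem.Dict Int Int) : List Int → List Int
  | [] => []
  | p :: t => ((p :: t).map (fun q => d.getD q 0)).sum :: sufSums d t

def preAcc (d : PySem.Dict Int Int) (c : Int) : List Int → List Int
  | [] => []
  | p :: t => (c + d.getD p 0) :: preAcc d (c + d.getD p 0) t

lemma fold_preAcc (d : PySem.Dict Int Int) :
    ∀ (l : List Int) (c : Int) (acc : List Int),
      l.foldl (fun (st : Int × List Int) p =>
          (st.1 + d.getD p 0, st.2 ++ [st.1 + d.getD p 0])) (c, acc)
        = (c + (l.map (fun q => d.getD q 0)).sum, acc ++ preAcc d c l) := by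
  intro l
  induction l with
  | nil => intro c acc; simp [preAcc]
  | cons p t ih =>
    intro c acc
    simp only [List.foldl_cons, ih, preAcc, List.map_cons, List.sum_cons]
    rw [Prod.mk.injEq]
    exact ⟨by ring, by simp⟩

lemma preAcc_append (d : PySem.Dict Int Int) :
    ∀ (l : List Int) (c p : Int),
      preAcc d c (l ++ [p]) = preAcc d c l ++ [c + (l.map (fun q => d.getD q 0)).sum + d.getD p 0] := by
  intro l
  induction l with
  | nil => intro c p; simp [preAcc]
  | cons q t ih =>
    intro c p
    simp only [List.cons_append, preAcc, ih, List.map_cons, List.sum_cons]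
    have : c + d.getD q 0 + (t.map (fun r => d.getD r 0)).sum = c + (d.getD q 0 + (t.map (fun r => d.getD r 0)).sum) := by ring
    rw [this]

lemma sufSums_eq_rev (d : PySem.Dict Int Int) :
    ∀ (l : List Int), sufSums d l = (preAcc d 0 l.reverse).reverse := by
  intro l
  induction l with
  | nil => simp [sufSums, preAcc]
  | cons p t ih =>
    rw [sufSums, List.reverse_cons, preAcc_append, List.reverse_append, ih]
    simp only [List.reverse_cons, List.reverse_nil, List.nil_append, List.cons_append]
    congr 1
    rw [List.map_reverse, List.sum_reverse]
    simp only [List.map_cons, List.sum_cons]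
    ring

lemma sufBuys_eq (d : PySem.Dict Int Int) (l : List Int) :
    sufBuys d l = sufSums d l := by
  rw [sufBuys, fold_preAcc, sufSums_eq_rev]
  simp

lemma filter_sorted_split (pre suf : List Int) (p : Int)
    (h : (pre ++ p :: suf).Pairwise (· < ·)) :
    (pre ++ p :: suf).filter (fun q => decide (q ≤ p)) = pre ++ [p]
    ∧ (pre ++ p :: suf).filter (fun q => decide (p ≤ q)) = p :: suf := by
  rw [List.pairwise_append] at h
  obtain ⟨hpre, hps, hcross⟩ := h
  rw [List.pairwise_cons] at hps
  constructor
  · rw [List.filter_append, List.filter_cons]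
    have h1 : pre.filter (fun q => decide (q ≤ p)) = pre := by
      apply List.filter_eq_self.2
      intro a ha; simp only [decide_eq_true_eq]
      exact le_of_lt (hcross a ha p (List.mem_cons_self))
    have h2 : suf.filter (fun q => decide (q ≤ p)) = [] := by
      apply List.filter_eq_nil_iff.2
      intro a ha; simp only [decide_eq_true_eq]
      exact not_le_of_gt (hps.1 a ha)
    simp [h1, h2]
  · rw [List.filter_append, List.filter_cons]
    have h1 : pre.filter (fun q => decide (p ≤ q)) = [] := by
      apply List.filter_eq_nil_iff.2
      intro a ha; simp only [decide_eq_true_eq]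
      exact not_le_of_gt (hcross a ha p (List.mem_cons_self))
    have h2 : suf.filter (fun q => decide (p ≤ q)) = suf := by
      apply List.filter_eq_self.2
      intro a ha; simp only [decide_eq_true_eq]
      exact le_of_lt (hps.1 a ha)
    simp [h1, h2]

-- the one-sweep fold of B computes A's selection fold, its supply, and the total ask prefix
lemma sweep_inv (d : PySem.Dict Int Int) (prices : List Int)
    (hd : d.keys.Nodup) (hbig : prices.Nodup) (hsorted : prices.Pairwise (· < ·))
    (hsubd : ∀ k ∈ d.keys, k ∈ prices) (hsuba : ∀ k ∈ pyAsks.keys, k ∈ prices) :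
    ∀ (suf pre : List Int), prices = pre ++ suf → ∀ (bp bv : Int),
      (suf.zip (sufSums d suf)).foldl (fun (st : Int × Int × Int × Int) pb =>
          if min pb.2 (st.2.2.2 + pyAsks.getD pb.1 0) > st.2.1
              ∨ (min pb.2 (st.2.2.2 + pyAsks.getD pb.1 0) = st.2.1 ∧ pb.1 > st.1)
          then (pb.1, min pb.2 (st.2.2.2 + pyAsks.getD pb.1 0), st.2.2.2 + pyAsks.getD pb.1 0,
                st.2.2.2 + pyAsks.getD pb.1 0)
          else (st.1, st.2.1, st.2.2.1, st.2.2.2 + pyAsks.getD pb.1 0))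
        (bp, bv, SELLof bp, (pre.map (fun q => pyAsks.getD q 0)).sum)
      = ((suf.foldl (stepA d) (bp, bv)).1, (suf.foldl (stepA d) (bp, bv)).2,
         SELLof (suf.foldl (stepA d) (bp, bv)).1, (prices.map (fun q => pyAsks.getD q 0)).sum) := by
  have hasknd : pyAsks.keys.Nodup := by decide
  intro suf
  induction suf with
  | nil =>
    intro pre hpre bp bv
    simp only [sufSums, List.zip_nil_right, List.foldl_nil]
    rw [hpre]
    simp
  | cons p t ih =>
    intro pre hpre bp bv
    have hsplit := filter_sorted_split pre t p (by rw [← hpre]; exact hsorted)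
    have e1 : prices.filter (fun q => decide (q ≥ p)) = p :: t := by
      rw [hpre]
      have := hsplit.2
      simpa [ge_iff_le] using this
    have e2 : prices.filter (fun q => decide (q ≤ p)) = pre ++ [p] := by
      rw [hpre]; exact hsplit.1
    have hbuy : ((p :: t).map (fun q => d.getD q 0)).sum = BUYof d p := by
      rw [← e1, sum_filter_getD prices d _ hbig hd hsubd]; rfl
    have hsell : ((pre ++ [p]).map (fun q => pyAsks.getD q 0)).sum = SELLof p := by
      rw [← e2, sum_filter_getD prices pyAsks _ hbig hasknd hsuba]; rfl
    have hs' : (pre.map (fun q => pyAsks.getD q 0)).sum + pyAsks.getD p 0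
        = ((pre ++ [p]).map (fun q => pyAsks.getD q 0)).sum := by
      simp
    have hpre' : prices = (pre ++ [p]) ++ t := by rw [hpre]; simp
    simp only [sufSums, List.zip_cons_cons, List.foldl_cons]
    rw [hbuy]
    have hv : min (BUYof d p) ((pre.map (fun q => pyAsks.getD q 0)).sum + pyAsks.getD p 0)
        = min (BUYof d p) (SELLof p) := by rw [hs', hsell]
    by_cases hc : min (BUYof d p) ((pre.map (fun q => pyAsks.getD q 0)).sum + pyAsks.getD p 0) > bv
        ∨ (min (BUYof d p) ((pre.map (fun q => pyAsks.getD q 0)).sum + pyAsks.getD p 0) = bv ∧ p > bp)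
    · have hc' : min (BUYof d p) (SELLof p) > bv ∨ (min (BUYof d p) (SELLof p) = bv ∧ p > bp) :=
        hv ▸ hc
      have hstep : stepA d (bp, bv) p = (p, min (BUYof d p) (SELLof p)) := by
        simp only [stepA]; rw [if_pos hc']
      have IH := ih (pre ++ [p]) hpre' p (min (BUYof d p) (SELLof p))
      rw [hsell] at IH
      rw [if_pos hc, hv, hs', hsell, IH, hstep]
    · have hc' : ¬(min (BUYof d p) (SELLof p) > bv ∨ (min (BUYof d p) (SELLof p) = bv ∧ p > bp)) := by
        rw [hv] at hc; exact hc
      have hstep : stepA d (bp, bv) p = (bp, bv) := by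
        simp only [stepA]; rw [if_neg hc']
      have IH := ih (pre ++ [p]) hpre' bp bv
      rw [if_neg hc, hs', IH, hstep]

lemma map_if_filter (x w : Int) (P : Int × Int → Bool) (hx : ∀ v : Int, P (x, v) = false) :
    ∀ l : List (Int × Int),
      (l.map (fun p => if p.1 == x then (x, w) else p)).filter P = l.filter P := by
  intro l
  induction l with
  | nil => rfl
  | cons a t ihl =>
    obtain ⟨a1, a2⟩ := a
    simp only [beq_iff_eq] at ihl
    simp only [List.map_cons, List.filter_cons, beq_iff_eq]
    by_cases ha : a1 = x
    · subst ha
      rw [if_pos rfl]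
      simp [hx, ihl]
    · rw [if_neg ha, ihl]

lemma filter_insert_items (d0 : PySem.Dict Int Int) (x w : Int) (P : Int × Int → Bool)
    (hx : ∀ v : Int, P (x, v) = false) :
    ((d0.insert x w).items.filter P) = d0.items.filter P := by
  by_cases hcont : d0.contains x = true
  · rw [PySem.Dict.items_insert_of_contains d0 w hcont]
    exact map_if_filter x w P hx d0.items
  · rw [PySem.Dict.items_insert_of_not_contains d0 w (by simpa using hcont)]
    rw [List.filter_append]
    have : [(x, w)].filter P = [] := by simp [hx w]
    rw [this, List.append_nil]

set_option maxHeartbeats 1000000 in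
lemma body_eq (my_price my_qty : Int) (d : PySem.Dict Int Int) (prices : List Int)
    (hdd : d = pyBids.insert my_price (pyBids.getD my_price 0 + my_qty))
    (hd : d.keys.Nodup) (hbig : prices.Nodup) (hsorted : prices.Pairwise (· < ·))
    (hsubd : ∀ k ∈ d.keys, k ∈ prices) (hsuba : ∀ k ∈ pyAsks.keys, k ∈ prices) :
    (if my_price < (prices.foldl (fun (st : Int × Int) price =>
          if get_volume price d pyAsks > st.2 ∨ (get_volume price d pyAsks = st.2 ∧ price > st.1)
          then (price, get_volume price d pyAsks) else st) (-1, -1)).1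
     then ((prices.foldl (fun (st : Int × Int) price =>
          if get_volume price d pyAsks > st.2 ∨ (get_volume price d pyAsks = st.2 ∧ price > st.1)
          then (price, get_volume price d pyAsks) else st) (-1, -1)).1, 0)
     else ((prices.foldl (fun (st : Int × Int) price =>
          if get_volume price d pyAsks > st.2 ∨ (get_volume price d pyAsks = st.2 ∧ price > st.1)
          then (price, get_volume price d pyAsks) else st) (-1, -1)).1,
        min my_qty (max 0
          (pyAsks.items.foldl (fun acc kv =>
              if kv.1 ≤ (prices.foldl (fun (st : Int × Int) price =>
                  if get_volume price d pyAsks > st.2 ∨ (get_volume price d pyAsks = st.2 ∧ price > st.1)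
                  then (price, get_volume price d pyAsks) else st) (-1, -1)).1
              then acc + kv.2 else acc) 0
           - (if my_price ≥ (prices.foldl (fun (st : Int × Int) price =>
                  if get_volume price d pyAsks > st.2 ∨ (get_volume price d pyAsks = st.2 ∧ price > st.1)
                  then (price, get_volume price d pyAsks) else st) (-1, -1)).1
              then d.items.foldl (fun acc kv =>
                  if kv.1 > my_price ∧ kv.1 ≥ (prices.foldl (fun (st : Int × Int) price =>
                      if get_volume price d pyAsks > st.2 ∨ (get_volume price d pyAsks = st.2 ∧ price > st.1)
                      then (price, get_volume price d pyAsks) else st) (-1, -1)).1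
                  then acc + kv.2 else acc) 0 + pyBids.getD my_price 0
              else d.items.foldl (fun acc kv =>
                  if kv.1 > my_price ∧ kv.1 ≥ (prices.foldl (fun (st : Int × Int) price =>
                      if get_volume price d pyAsks > st.2 ∨ (get_volume price d pyAsks = st.2 ∧ price > st.1)
                      then (price, get_volume price d pyAsks) else st) (-1, -1)).1
                  then acc + kv.2 else acc) 0)))))
    = (if my_price < ((prices.zip (sufSums d prices)).foldl (fun (st : Int × Int × Int × Int) pb =>
          if min pb.2 (st.2.2.2 + pyAsks.getD pb.1 0) > st.2.1
              ∨ (min pb.2 (st.2.2.2 + pyAsks.getD pb.1 0) = st.2.1 ∧ pb.1 > st.1)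
          then (pb.1, min pb.2 (st.2.2.2 + pyAsks.getD pb.1 0), st.2.2.2 + pyAsks.getD pb.1 0,
                st.2.2.2 + pyAsks.getD pb.1 0)
          else (st.1, st.2.1, st.2.2.1, st.2.2.2 + pyAsks.getD pb.1 0)) (-1, -1, 0, 0)).1
       then (((prices.zip (sufSums d prices)).foldl (fun (st : Int × Int × Int × Int) pb =>
          if min pb.2 (st.2.2.2 + pyAsks.getD pb.1 0) > st.2.1
              ∨ (min pb.2 (st.2.2.2 + pyAsks.getD pb.1 0) = st.2.1 ∧ pb.1 > st.1)
          then (pb.1, min pb.2 (st.2.2.2 + pyAsks.getD pb.1 0), st.2.2.2 + pyAsks.getD pb.1 0,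
                st.2.2.2 + pyAsks.getD pb.1 0)
          else (st.1, st.2.1, st.2.2.1, st.2.2.2 + pyAsks.getD pb.1 0)) (-1, -1, 0, 0)).1, 0)
       else (((prices.zip (sufSums d prices)).foldl (fun (st : Int × Int × Int × Int) pb =>
          if min pb.2 (st.2.2.2 + pyAsks.getD pb.1 0) > st.2.1
              ∨ (min pb.2 (st.2.2.2 + pyAsks.getD pb.1 0) = st.2.1 ∧ pb.1 > st.1)
          then (pb.1, min pb.2 (st.2.2.2 + pyAsks.getD pb.1 0), st.2.2.2 + pyAsks.getD pb.1 0,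
                st.2.2.2 + pyAsks.getD pb.1 0)
          else (st.1, st.2.1, st.2.2.1, st.2.2.2 + pyAsks.getD pb.1 0)) (-1, -1, 0, 0)).1,
         min my_qty (max 0
           (((prices.zip (sufSums d prices)).foldl (fun (st : Int × Int × Int × Int) pb =>
          if min pb.2 (st.2.2.2 + pyAsks.getD pb.1 0) > st.2.1
              ∨ (min pb.2 (st.2.2.2 + pyAsks.getD pb.1 0) = st.2.1 ∧ pb.1 > st.1)
          then (pb.1, min pb.2 (st.2.2.2 + pyAsks.getD pb.1 0), st.2.2.2 + pyAsks.getD pb.1 0,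
                st.2.2.2 + pyAsks.getD pb.1 0)
          else (st.1, st.2.1, st.2.2.1, st.2.2.2 + pyAsks.getD pb.1 0)) (-1, -1, 0, 0)).2.2.1
            - (((pyBids.items.filter (fun kv => decide (kv.1 > my_price ∧ kv.1 ≥
                 ((prices.zip (sufSums d prices)).foldl (fun (st : Int × Int × Int × Int) pb =>
          if min pb.2 (st.2.2.2 + pyAsks.getD pb.1 0) > st.2.1
              ∨ (min pb.2 (st.2.2.2 + pyAsks.getD pb.1 0) = st.2.1 ∧ pb.1 > st.1)
          then (pb.1, min pb.2 (st.2.2.2 + pyAsks.getD pb.1 0), st.2.2.2 + pyAsks.getD pb.1 0,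
                st.2.2.2 + pyAsks.getD pb.1 0)
          else (st.1, st.2.1, st.2.2.1, st.2.2.2 + pyAsks.getD pb.1 0)) (-1, -1, 0, 0)).1))).map (·.2)).sum
               + pyBids.getD my_price 0))))) := by
  have hfun : (fun (st : Int × Int) price =>
      if get_volume price d pyAsks > st.2 ∨ (get_volume price d pyAsks = st.2 ∧ price > st.1)
      then (price, get_volume price d pyAsks) else st) = stepA d := by
    funext st price; simp only [get_volume_eq, stepA]
  have hsw := sweep_inv d prices hd hbig hsorted hsubd hsuba prices [] rfl (-1) (-1)
  have hsell0 : SELLof (-1) = 0 := by decide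
  rw [hsell0] at hsw
  simp only [List.map_nil, List.sum_nil] at hsw
  rw [hfun, hsw]
  simp only []
  generalize (List.foldl (stepA d) (-1, -1) prices).1 = cp
  by_cases hlt : my_price < cp
  · rw [if_pos hlt, if_pos hlt]
  · rw [if_neg hlt, if_neg hlt, if_pos (not_lt.mp hlt : cp ≤ my_price)]
    have hsupply : pyAsks.items.foldl (fun acc kv => if kv.1 ≤ cp then acc + kv.2 else acc) 0
        = SELLof cp := by
      rw [PySem.List.foldl_ite_eq_foldl_filter (fun kv : Int × Int => kv.1 ≤ cp)
          (fun acc kv => acc + kv.2) pyAsks.items 0, PySem.List.foldl_add]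
      simp [SELLof]
    have hbefore : d.items.foldl (fun acc kv =>
          if kv.1 > my_price ∧ kv.1 ≥ cp then acc + kv.2 else acc) 0
        = ((pyBids.items.filter (fun kv => decide (kv.1 > my_price ∧ kv.1 ≥ cp))).map (·.2)).sum := by
      rw [PySem.List.foldl_ite_eq_foldl_filter (fun kv : Int × Int => kv.1 > my_price ∧ kv.1 ≥ cp)
          (fun acc kv => acc + kv.2) d.items 0, PySem.List.foldl_add, hdd,
        filter_insert_items pyBids my_price (pyBids.getD my_price 0 + my_qty) _ (fun v => by simp)]
      simp
    rw [hsupply, hbefore]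

-- ===== VERDICT (by name: the statement is the Claim_ definition above) =====
set_option maxHeartbeats 1000000 in
theorem get_fill_spec : Claim_equal_get_fill := by
  intro my_price my_qty _
  unfold Spec_get_fill
  have hbidsnd : pyBids.keys.Nodup := by decide
  simp only [get_fill, get_fill_alt, get_clearing_price, sufBuys_eq]
  have hd : (pyBids.insert my_price (pyBids.getD my_price 0 + my_qty)).keys.Nodup :=
    PySem.Dict.nodup_keys_insert _ _ _ hbidsnd
  have hUnd : (PySem.Set.union (PySem.Set.ofList
      (pyBids.insert my_price (pyBids.getD my_price 0 + my_qty)).keys) pyAsks.keys).Nodup :=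
    PySem.Set.nodup_union _ _ (PySem.Set.nodup_ofList _)
  have hperm := PySem.List.sorted_perm (PySem.Set.union (PySem.Set.ofList
      (pyBids.insert my_price (pyBids.getD my_price 0 + my_qty)).keys) pyAsks.keys) (fun x => x) false
  have hbig := (hperm.nodup_iff).2 hUnd
  have hle := PySem.List.sorted_pairwise (PySem.Set.union (PySem.Set.ofList
      (pyBids.insert my_price (pyBids.getD my_price 0 + my_qty)).keys) pyAsks.keys) (fun x => x)
  have hsorted : (PySem.List.sorted (PySem.Set.union (PySem.Set.ofList
      (pyBids.insert my_price (pyBids.getD my_price 0 + my_qty)).keys) pyAsks.keys)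
      (fun x => x) false).Pairwise (· < ·) := by
    have h1 := List.Pairwise.and hle hbig
    exact h1.imp fun h => lt_of_le_of_ne h.1 h.2
  have hsubd : ∀ k ∈ (pyBids.insert my_price (pyBids.getD my_price 0 + my_qty)).keys,
      k ∈ PySem.List.sorted (PySem.Set.union (PySem.Set.ofList
        (pyBids.insert my_price (pyBids.getD my_price 0 + my_qty)).keys) pyAsks.keys)
        (fun x => x) false := by
    intro k hk
    rw [PySem.List.mem_sorted, PySem.Set.mem_union]
    left; rw [PySem.Set.mem_ofList]; exact hk
  have hsuba : ∀ k ∈ pyAsks.keys,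
      k ∈ PySem.List.sorted (PySem.Set.union (PySem.Set.ofList
        (pyBids.insert my_price (pyBids.getD my_price 0 + my_qty)).keys) pyAsks.keys)
        (fun x => x) false := by
    intro k hk
    rw [PySem.List.mem_sorted, PySem.Set.mem_union]
    right; exact hk
  exact body_eq my_price my_qty _ _ rfl hd hbig hsorted hsubd hsuba
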